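-- pv_equiv track=rewrite | github.com/Shwetaagrawal1994/SQL-Practice-Questions | Basic_Python_Ques.py | sec_non_rep
-- ===== SOURCE A (Python) =====
-- def sec_non_rep(user_str):
--      char_non_rep_sec = ''
--      for ele in user_str:
--          upd_str = user_str.replace(ele, '')
--          if len(upd_str) ==  len(user_str)-1:
--             char_non_rep_sec += ele
--          if len(char_non_rep_sec) == 2:
--             return char_non_rep_sec[1]
-- ===== SOURCE B (Python) =====
-- def sec_non_rep(user_str):
--     counts = {}
--     for ch in user_str:
--         counts[ch] = counts.get(ch, 0) + 1
--     singles = [ch for ch, n in counts.items() if n == 1]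
--     return singles[1] if len(singles) > 1 else None
-- ===== Notes on version B (the rewrite author's own statement) =====
-- stated objective: faster
-- what changed: Replaces A's per-character whole-string rescans (str.replace inside the loop) with one counting pass building a dict, then a pass over the dict's items collecting count-1 characters and indexing the second.
import Mathlib
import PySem

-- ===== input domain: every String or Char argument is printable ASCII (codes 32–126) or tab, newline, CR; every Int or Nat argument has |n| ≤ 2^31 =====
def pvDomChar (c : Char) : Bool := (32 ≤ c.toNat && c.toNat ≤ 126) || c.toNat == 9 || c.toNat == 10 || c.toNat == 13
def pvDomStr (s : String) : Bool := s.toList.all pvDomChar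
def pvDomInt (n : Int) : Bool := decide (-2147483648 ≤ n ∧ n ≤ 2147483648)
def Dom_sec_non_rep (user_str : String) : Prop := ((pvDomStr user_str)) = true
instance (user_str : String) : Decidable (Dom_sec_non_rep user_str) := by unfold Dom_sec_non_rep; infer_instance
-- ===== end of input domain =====

-- B builds a character-count dict in one pass and reads the second count-1 key off the
-- dict's items, replacing A's per-character whole-string rescans (faster: O(n) vs O(n^2)).

-- ===== PORT A =====
-- loop 'for ele in user_str' with accumulator char_non_rep_sec (as List Char) and early return
def secA_go (s : List Char) : List Char → List Char → Option String
  | _acc, [] => none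
  | acc, ele :: rest =>
    let upd := PySem.Chars.replace s [ele] []
    let acc' := if (upd.length : Int) = (s.length : Int) - 1 then acc ++ [ele] else acc
    if acc'.length = 2 then some (String.mk [PySem.List.pyGetD acc' (1 : Int) ' ']) else
      secA_go s acc' rest

def sec_non_rep (user_str : String) : Option String :=
  secA_go user_str.toList [] user_str.toList

-- ===== PORT B =====
def sec_non_rep_alt (user_str : String) : Option String :=
  let counts := user_str.toList.foldl
    (fun (d : PySem.Dict Char Int) ch => d.insert ch (d.getD ch 0 + 1)) PySem.Dict.empty
  let singles := (counts.items.filter (fun p => p.2 == (1 : Int))).map Prod.fst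
  if h : 1 < singles.length then some (String.mk [singles[1]]) else none

-- ===== PRECONDITION & SPEC =====
def Spec_sec_non_rep (user_str : String) (out : Option String) : Prop := out = sec_non_rep_alt user_str
instance (user_str : String) (out : Option String) : Decidable (Spec_sec_non_rep user_str out) := by unfold Spec_sec_non_rep; infer_instance

-- ===== CLAIM (what is proved, stated in full; the proofs are below) =====
def Claim_equal_sec_non_rep : Prop := ∀ (user_str : String), Dom_sec_non_rep user_str → Spec_sec_non_rep user_str (sec_non_rep user_str)

-- ===== LEMMAS AND PROOFS =====

-- replace.go with a single-char pattern and empty replacement filters that char out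
lemma replace_go_single (c : Char) : ∀ (fuel : Nat) (l acc : List Char), l.length ≤ fuel →
    PySem.Chars.replace.go [c] [] fuel l acc = acc.reverse ++ l.filter (fun d => d != c) := by
  intro fuel
  induction fuel with
  | zero =>
    intro l acc h
    have : l = [] := List.eq_nil_of_length_eq_zero (Nat.le_zero.mp h)
    subst this
    simp [PySem.Chars.replace.go]
  | succ n ih =>
    intro l acc h
    cases l with
    | nil => simp [PySem.Chars.replace.go]
    | cons d t =>
      simp only [PySem.Chars.replace.go]
      by_cases hd : c = d
      · subst hd
        have hp : List.isPrefixOf [c] (c :: t) = true := by simp [List.isPrefixOf]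
        simp only [hp]
        rw [ih _ _ (by simpa using Nat.le_of_succ_le_succ h)]
        simp
      · have hp : List.isPrefixOf [c] (d :: t) = false := by
          simp [List.isPrefixOf, hd]
        simp only [hp]
        rw [if_neg (by simp)]
        rw [ih _ _ (by simpa using Nat.le_of_succ_le_succ h)]
        simp [Ne.symm hd]

lemma replace_single (c : Char) (s : List Char) :
    PySem.Chars.replace s [c] [] = s.filter (fun d => d != c) := by
  rw [PySem.Chars.replace]
  simp only [List.isEmpty_cons, if_false, Bool.false_eq_true]
  exact replace_go_single c s.length s [] (le_refl _)

lemma filter_len_count (s : List Char) (c : Char) :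
    (s.filter (fun d => d != c)).length + s.count c = s.length := by
  induction s with
  | nil => simp
  | cons x xs ih =>
    by_cases h : x = c
    · subst h
      simp only [List.filter_cons, bne_self_eq_false, List.count_cons_self,
        List.length_cons, Bool.false_eq_true, ite_false]
      omega
    · have hb : (x != c) = true := by simp [bne, h]
      have hb2 : (x == c) = false := by simp [h]
      simp only [List.filter_cons, List.count_cons, List.length_cons, hb, hb2,
        if_true, if_false, Bool.false_eq_true]
      omega

lemma cond_iff (s : List Char) (c : Char) :
    (((PySem.Chars.replace s [c] []).length : Int) = (s.length : Int) - 1) ↔ s.count c = 1 := by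
  rw [replace_single]
  have h1 := filter_len_count s c
  omega

-- characterisation of A's loop: second count-1 character of acc ++ (filtered rest)
lemma secA_go_eq (s : List Char) : ∀ (r acc : List Char), acc.length ≤ 1 →
    secA_go s acc r =
      ((acc ++ r.filter (fun c => s.count c == 1))[1]?).map (fun c => String.mk [c]) := by
  intro r
  induction r with
  | nil =>
    intro acc h
    match acc, h with
    | [], _ => simp [secA_go]
    | [a], _ => simp [secA_go]
  | cons ele rest ih =>
    intro acc h
    simp only [secA_go]
    by_cases hc : s.count ele = 1
    · rw [if_pos ((cond_iff s ele).mpr hc)]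
      match acc, h with
      | [a], _ =>
        rw [if_pos (show (([a] : List Char) ++ [ele]).length = 2 from rfl)]
        simp [hc, PySem.List.pyGetD]
      | [], _ =>
        rw [if_neg (show ¬(([] : List Char) ++ [ele]).length = 2 by simp)]
        simp only [List.nil_append]
        rw [ih [ele] (by simp)]
        simp [hc]
    · rw [if_neg (fun hh => hc ((cond_iff s ele).mp hh))]
      rw [if_neg (show ¬acc.length = 2 by omega)]
      rw [ih acc h]
      simp [hc]

lemma secA_eq (s : String) :
    sec_non_rep s =
      ((s.toList.filter (fun c => s.toList.count c == 1))[1]?).map (fun c => String.mk [c]) := by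
  rw [sec_non_rep, secA_go_eq _ _ [] (by simp)]
  simp

-- deduplication does not change the sublist of elements that occur at most once
lemma filter_ofList (l : List Char) (p : Char → Bool) (hp : ∀ c, p c = true → l.count c ≤ 1) :
    (PySem.Set.ofList l).filter p = l.filter p := by
  induction l with
  | nil => rfl
  | cons x xs ih =>
    have hcount : ∀ c, p c = true → xs.count c ≤ 1 := by
      intro c hc
      have h1 := hp c hc
      have h2 := (List.sublist_cons_self x xs).count_le c
      omega
    rw [PySem.Set.ofList_cons]
    by_cases hx : p x = true
    · have h1 := hp x hx
      have hcc : (x :: xs).count x = xs.count x + 1 := List.count_cons_self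
      have hx0 : xs.count x = 0 := by omega
      have hnm : x ∉ PySem.Set.ofList xs := by
        rw [PySem.Set.mem_ofList]
        intro hmem
        have := List.count_pos_iff.mpr hmem
        omega
      have hd : PySem.Set.discard (PySem.Set.ofList xs) x = PySem.Set.ofList xs := by
        rw [PySem.Set.discard]
        apply List.filter_eq_self.mpr
        intro y hy
        have : y ≠ x := fun he => hnm (he ▸ hy)
        simp [this]
      rw [hd]
      simp [hx, ih hcount]
    · have hxf : p x = false := by simpa using hx
      have hd : ((PySem.Set.ofList xs).filter (fun y => !(y == x))).filter p
          = (PySem.Set.ofList xs).filter p := by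
        rw [List.filter_filter]
        apply List.filter_congr
        intro y _
        by_cases hyx : y = x
        · subst hyx; simp [hxf]
        · simp [hyx]
      rw [List.filter_cons, List.filter_cons]
      simp only [hxf, Bool.false_eq_true, if_false]
      rw [PySem.Set.discard, hd, ih hcount]

-- dict-items indexing form of B rewritten as an Option.map over getElem?
lemma if_index (xs : List Char) :
    (if h : 1 < xs.length then some (String.mk [xs[1]]) else none)
      = (xs[1]?).map (fun c => String.mk [c]) := by
  by_cases h : 1 < xs.length
  · rw [dif_pos h, List.getElem?_eq_getElem h]
    rfl
  · rw [dif_neg h, List.getElem?_eq_none (by omega)]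
    rfl

lemma secB_eq (s : String) :
    sec_non_rep_alt s =
      ((s.toList.filter (fun c => s.toList.count c == 1))[1]?).map (fun c => String.mk [c]) := by
  simp only [sec_non_rep_alt]
  rw [PySem.Dict.foldl_insert_getD_add_one_eq_counter, PySem.Dict.items_counter]
  have hsingles :
      (((PySem.Set.ofList s.toList).map (fun k => (k, (s.toList.count k : Int)))).filter
          (fun p => p.2 == (1 : Int))).map Prod.fst
        = s.toList.filter (fun c => s.toList.count c == 1) := by
    rw [List.filter_map, List.map_map]
    have h1 : ((fun p : Char × Int => p.2 == (1 : Int)) ∘ fun k => (k, (s.toList.count k : Int)))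
        = fun c => s.toList.count c == 1 := by
      funext c
      simp only [Function.comp]
      by_cases h : s.toList.count c = 1
      · simp [h]
      · have h2 : (s.toList.count c : Int) ≠ 1 := by omega
        simp [h, h2]
    rw [h1]
    have h2 : (Prod.fst ∘ fun k : Char => (k, (s.toList.count k : Int))) = id := by
      funext c
      rfl
    rw [h2, List.map_id]
    apply filter_ofList
    intro c hc
    simp only [beq_iff_eq] at hc
    omega
  rw [hsingles, if_index]

-- ===== VERDICT (by name: the statement is the Claim_ definition above) =====
theorem sec_non_rep_spec : Claim_equal_sec_non_rep := by
  intro s _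
  unfold Spec_sec_non_rep
  rw [secA_eq, secB_eq]
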